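-- pv_equiv track=rewrite | github.com/dmnth/api_scraper | src/MIDs/rearrange_json.py | shambles
-- ===== SOURCE A (Python) =====
-- def shambles(data):
--     new_dict = {}
--     # get country names and pick one
--     for key, value in data.items():
--         current_country = value[-1]
--         new_dict[current_country] = [key]
--         for key in data.keys():
--             if current_country in data[key]:
--                 new_dict[current_country].append(key)
--     return new_dict
-- ===== SOURCE B (Python) =====
-- def shambles(data):
--     index = {}
--     for key, value in data.items():
--         for country in dict.fromkeys(value):
--             index.setdefault(country, []).append(key)
--     result = {}
--     for key, value in data.items():
--         country = value[-1]
--         result[country] = [key] + index.get(country, [])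
--     return result
-- ===== Notes on version B (the rewrite author's own statement) =====
-- stated objective: faster
-- what changed: B builds a country->keys index in one pass over the items (dedup each value list, append the key under every country it contains) and then assembles each entry by a single lookup, instead of A's rescan of every key's value list for every item.
import Mathlib
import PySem

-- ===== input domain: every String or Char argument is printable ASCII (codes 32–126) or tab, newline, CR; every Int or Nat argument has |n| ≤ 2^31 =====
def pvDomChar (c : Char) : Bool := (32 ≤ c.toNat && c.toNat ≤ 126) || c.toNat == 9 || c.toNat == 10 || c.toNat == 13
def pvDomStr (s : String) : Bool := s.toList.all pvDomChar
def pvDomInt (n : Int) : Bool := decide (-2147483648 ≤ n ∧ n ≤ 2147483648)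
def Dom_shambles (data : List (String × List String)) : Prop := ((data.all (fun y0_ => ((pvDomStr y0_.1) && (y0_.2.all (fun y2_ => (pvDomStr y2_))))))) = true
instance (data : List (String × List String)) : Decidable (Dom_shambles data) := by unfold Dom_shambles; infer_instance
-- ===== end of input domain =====

-- B replaces A's quadratic rescan of all keys per item by a country→keys index built in
-- one pass (objective: faster). The dict argument is modelled as the association list via
-- PySem.Dict.ofList (later duplicate value wins, first position kept), exactly Python's dict.

-- ===== PORT A =====
def shambles (data : List (String × List String)) : List (String × List String) :=
  let d := PySem.Dict.ofList data
  (d.items.foldl (fun nd p =>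
      let current_country := (PySem.List.pyGet? p.2 (-1)).getD ""   -- value[-1]; Pre_ rules out the IndexError (empty value)
      let nd1 := nd.insert current_country [p.1]
      d.keys.foldl (fun nd2 k =>
        if (d.getD k []).contains current_country then
          nd2.modify current_country [] (· ++ [k])
        else nd2) nd1)
    PySem.Dict.empty).items

-- ===== PORT B =====
def shambles_alt (data : List (String × List String)) : List (String × List String) :=
  let d := PySem.Dict.ofList data
  let index := d.items.foldl (fun ix p =>
      (PySem.List.dedup p.2).foldl (fun ix c => ix.modify c [] (· ++ [p.1])) ix)
    PySem.Dict.empty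
  (d.items.foldl (fun nd p =>
      let country := (PySem.List.pyGet? p.2 (-1)).getD ""
      nd.insert country ([p.1] ++ index.getD country [])) PySem.Dict.empty).items

-- ===== PRECONDITION & SPEC =====
-- Pre_ excludes exactly the inputs whose dict has an entry with an empty value list: there
-- value[-1] raises IndexError in A (B raises the same way).
def Pre_shambles (data : List (String × List String)) : Prop :=
  ∀ p ∈ (PySem.Dict.ofList data).items, p.2 ≠ []
instance (data : List (String × List String)) : Decidable (Pre_shambles data) := by
  unfold Pre_shambles; infer_instance
def pvWitness_shambles : (List (String × List String)) :=
  [("k1", ["France", "Spain"]), ("k2", ["Spain"])]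
def Spec_shambles (data : List (String × List String)) (out : List (String × List String)) : Prop := out = shambles_alt data
instance (data : List (String × List String)) (out : List (String × List String)) : Decidable (Spec_shambles data out) := by unfold Spec_shambles; infer_instance

-- ===== CLAIM (what is proved, stated in full; the proofs are below) =====
def Claim_equal_shambles : Prop := ∀ (data : List (String × List String)), Dom_shambles data → Pre_shambles data → Spec_shambles data (shambles data)

-- ===== LEMMAS AND PROOFS =====

-- B's inner loop over the deduplicated value list appends the key once iff the country is in the value.
lemma inner_modify_count (k c : String) (l : List String) (ix : PySem.Dict String (List String)) :
    (l.foldl (fun ix c' => ix.modify c' [] (· ++ [k])) ix).getD c []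
      = ix.getD c [] ++ List.replicate (l.count c) k := by
  induction l generalizing ix with
  | nil => simp
  | cons x t ih =>
    simp only [List.foldl_cons, ih, List.count_cons]
    rw [PySem.Dict.getD_modify]
    by_cases hx : c = x
    · simp [hx, List.replicate_succ]
    · have : (x == c) = false := by simp [Ne.symm hx]
      simp [hx, this]

-- characterisation of B's index at any country
lemma index_getD (c : String) (l : List (String × List String)) (ix : PySem.Dict String (List String)) :
    (l.foldl (fun ix p => (PySem.List.dedup p.2).foldl (fun ix c' => ix.modify c' [] (· ++ [p.1])) ix) ix).getD c []
      = ix.getD c [] ++ (l.filter (fun p => p.2.contains c)).map (·.1) := by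
  induction l generalizing ix with
  | nil => simp
  | cons p t ih =>
    simp only [List.foldl_cons, ih, List.filter_cons]
    by_cases hc : c ∈ p.2
    · have h1 : (PySem.List.dedup p.2).count c = 1 :=
        List.count_eq_one_of_mem (PySem.List.nodup_dedup p.2) ((PySem.List.mem_dedup p.2 c).2 hc)
      rw [inner_modify_count, h1]
      simp [hc]
    · have h0 : (PySem.List.dedup p.2).count c = 0 := by
        simp [List.count_eq_zero, hc]
      rw [inner_modify_count, h0]
      simp [hc]

-- A's inner scan, started right after `new_dict[c] = [key]`, appends the filtered keys to that entry.
lemma scan_after_insert (c : String) (q : String → Bool) (ks : List String)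
    (nd : PySem.Dict String (List String)) (v0 : List String) :
    (ks.foldl (fun nd2 k => if q k then nd2.modify c [] (· ++ [k]) else nd2) (nd.insert c v0))
      = nd.insert c (v0 ++ ks.filter q) := by
  induction ks generalizing v0 with
  | nil => simp
  | cons k t ih =>
    simp only [List.foldl_cons, List.filter_cons]
    by_cases hq : q k
    · have : (nd.insert c v0).modify c [] (· ++ [k])
          = nd.insert c (v0 ++ [k]) := by
        show (nd.insert c v0).insert c ((nd.insert c v0).getD c [] ++ [k]) = _
        rw [PySem.Dict.getD_insert_self, PySem.Dict.insert_insert_self]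
      simp [hq, this, ih]
    · simp [hq, ih]

-- filtering the key list through dict lookups = filtering the items directly
lemma filter_keys_eq (c : String) (d : PySem.Dict String (List String))
    (l : List (String × List String)) (hl : ∀ p ∈ l, d.getD p.1 [] = p.2) :
    (l.map (·.1)).filter (fun k => (d.getD k []).contains c)
      = (l.filter (fun p => p.2.contains c)).map (·.1) := by
  induction l with
  | nil => simp
  | cons p t ih =>
    have hp := hl p (by simp)
    have ht : ∀ p ∈ t, d.getD p.1 [] = p.2 := fun q hq => hl q (by simp [hq])
    simp only [List.map_cons, List.filter_cons, hp, ih ht]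
    by_cases hc : c ∈ p.2 <;> simp [hc]

theorem shambles_eq_alt (data : List (String × List String)) :
    shambles data = shambles_alt data := by
  unfold shambles shambles_alt
  set d := PySem.Dict.ofList data with hd
  have hnd : d.keys.Nodup := PySem.Dict.nodup_keys_ofList data
  have hlook : ∀ p ∈ d.items, d.getD p.1 [] = p.2 := by
    intro p hp
    exact PySem.Dict.getD_of_mem_items d (by simpa using hp) hnd []
  have hkeys : d.keys = d.items.map (·.1) := rfl
  dsimp only
  congr 1
  apply PySem.List.foldl_congr_mem
  intro nd p hp
  dsimp only
  set c := (PySem.List.pyGet? p.2 (-1)).getD "" with hc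
  rw [hkeys, scan_after_insert, filter_keys_eq c d d.items hlook, index_getD]
  simp

-- ===== VERDICT (by name: the statement is the Claim_ definition above) =====
theorem shambles_spec : Claim_equal_shambles := by
  intro data _ _
  unfold Spec_shambles
  exact shambles_eq_alt data
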